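-- pv_equiv track=rewrite | github.com/mrothma1/NuLattice | NuLattice/FCI/few_body_diagonalization.py | get_many_body_states
-- ===== SOURCE A (Python) =====
-- from itertools import combinations
--
-- def get_many_body_states(basis, num_part, total_tz=None, total_sz=None):
--     """
--     returns dictionary of many-body states
--
--     :param basis:     the single-particle basis
--     :type basis:      list[list[int, int, int, int, int], [ ...]]
--     :param num_part:  number of fermions
--     :type num_part:   int
--     :param total_tz: total z-component of isospin (twice its value)
--     :type total_tz:   int
--     :param total_sz:  total z-component of spin (twice its value)
--     :type total_sz:   int
--     :return:          a dictionary where keys are tuples of single-particle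
--                       states and values are the indices of that many-body
--                       state; this eerves as a lookup table.
--     :rtype:           dict(tuple(int, int, int, ...): int)
--     """
--
--     nstat = len(basis)
--     iter_states = combinations(range(nstat), num_part)
--     # yields all combinations (nstat choose num_part) as an iterator of tuples
--     # iterators can only be used once
--
--     many_body_bas = []
--     for values in iter_states:
--         if total_tz is not None:
--             tz = 0
--             for i in range(num_part):
--                 tz += basis[values[i]][3]
--             tz = 2*tz - num_part
--             if tz != total_tz:
--                 continue
--         if total_sz is not None:
--             sz = 0
--             for i in range(num_part):
--                 sz += basis[values[i]][4]
--             sz = 2*sz - num_part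
--             if sz != total_sz:
--                 continue
--
--         many_body_bas.append(values)
--
--     dim  = len(many_body_bas)
--
--     vals = range(dim)
--     return dict(zip(many_body_bas, vals))
-- ===== SOURCE B (Python) =====
-- def get_many_body_states(basis, num_part, total_tz=None, total_sz=None):
--     """Pruned DFS over index order with incremental tz/sz partial sums,
--     building the lookup dict directly instead of re-summing each combination."""
--     if num_part < 0:
--         raise ValueError("r must be non-negative")
--     n = len(basis)
--     out = {}
--
--     def dfs(start, chosen, tsum, ssum):
--         need = num_part - len(chosen)
--         if need == 0:
--             if total_tz is not None and 2 * tsum - num_part != total_tz: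
--                 return
--             if total_sz is not None and 2 * ssum - num_part != total_sz:
--                 return
--             out[tuple(chosen)] = len(out)
--             return
--         for i in range(start, n - need + 1):
--             chosen.append(i)
--             dfs(i + 1, chosen,
--                 tsum + (basis[i][3] if total_tz is not None else 0),
--                 ssum + (basis[i][4] if total_sz is not None else 0))
--             chosen.pop()
--
--     dfs(0, [], 0, 0)
--     return out
-- ===== Notes on version B (the rewrite author's own statement) =====
-- stated objective: alternative
-- what changed: Replaces itertools.combinations plus a per-combination O(k) re-summation of tz/sz with a pruned DFS over index order that carries incremental tz/sz partial sums and assigns dictionary indices as states are emitted.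
-- outside the precondition, e.g. on get_many_body_states([[0, 0, 0, 0]], 1, 5, 0): A returns {}, B raises IndexError
import Mathlib
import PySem

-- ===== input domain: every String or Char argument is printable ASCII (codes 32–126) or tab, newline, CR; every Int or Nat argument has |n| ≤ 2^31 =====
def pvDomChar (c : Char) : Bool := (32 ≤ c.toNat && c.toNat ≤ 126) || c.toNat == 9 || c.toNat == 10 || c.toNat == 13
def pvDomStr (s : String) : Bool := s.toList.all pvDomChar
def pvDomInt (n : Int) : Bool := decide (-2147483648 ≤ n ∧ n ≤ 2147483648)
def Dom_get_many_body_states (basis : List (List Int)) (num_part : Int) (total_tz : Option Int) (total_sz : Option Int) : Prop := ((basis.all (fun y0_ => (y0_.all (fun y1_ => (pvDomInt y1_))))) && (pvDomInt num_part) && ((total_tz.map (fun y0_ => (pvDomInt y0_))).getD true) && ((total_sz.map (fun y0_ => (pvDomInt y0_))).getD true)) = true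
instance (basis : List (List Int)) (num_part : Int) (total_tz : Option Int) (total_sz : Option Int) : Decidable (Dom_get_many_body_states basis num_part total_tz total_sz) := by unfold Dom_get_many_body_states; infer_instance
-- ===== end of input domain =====

-- B replaces A's itertools.combinations enumeration + per-combination re-summation by a pruned
-- DFS over index order with incremental tz/sz partial sums (objective: alternative algorithm).

-- ===== PORT A =====
-- A's inner loop 'for i in range(num_part): tz += basis[values[i]][3]'
def pvA_tzsum (basis : List (List Int)) (num_part : Int) (values : List Int) : Int :=
  (PySem.List.pyRange 0 num_part 1).foldl
    (fun tz i => tz + PySem.List.pyGetD (PySem.List.pyGetD basis (PySem.List.pyGetD values i 0) []) 3 0) 0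

def pvA_szsum (basis : List (List Int)) (num_part : Int) (values : List Int) : Int :=
  (PySem.List.pyRange 0 num_part 1).foldl
    (fun sz i => sz + PySem.List.pyGetD (PySem.List.pyGetD basis (PySem.List.pyGetD values i 0) []) 4 0) 0

-- the 'if total_sz is not None: … continue' block followed by the append
def pvA_szCheck (basis : List (List Int)) (num_part : Int) (total_sz : Option Int)
    (acc : List (List Int)) (values : List Int) : List (List Int) :=
  match total_sz with
  | some s0 => if 2 * pvA_szsum basis num_part values - num_part ≠ s0 then acc else acc ++ [values]
  | none => acc ++ [values]

-- the body of A's 'for values in iter_states' loop ('continue' chain)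
def pvA_body (basis : List (List Int)) (num_part : Int) (total_tz total_sz : Option Int)
    (acc : List (List Int)) (values : List Int) : List (List Int) :=
  match total_tz with
  | some t0 => if 2 * pvA_tzsum basis num_part values - num_part ≠ t0 then acc
               else pvA_szCheck basis num_part total_sz acc values
  | none => pvA_szCheck basis num_part total_sz acc values

def get_many_body_states (basis : List (List Int)) (num_part : Int) (total_tz : Option Int) (total_sz : Option Int) : List (List Int × Int) :=
  let nstat : Int := basis.length
  let iter_states := PySem.List.combinations (PySem.List.pyRange 0 nstat 1) num_part.toNat
  let many_body_bas := iter_states.foldl (pvA_body basis num_part total_tz total_sz) []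
  let dim : Int := many_body_bas.length
  List.zip many_body_bas (PySem.List.pyRange 0 dim 1)

-- ===== PORT B =====
-- 'basis[i][3] if total_tz is not None else 0'
def pvB_tv (basis : List (List Int)) (total_tz : Option Int) (i : Int) : Int :=
  if total_tz.isSome then PySem.List.pyGetD (PySem.List.pyGetD basis i []) 3 0 else 0

def pvB_sv (basis : List (List Int)) (total_sz : Option Int) (i : Int) : Int :=
  if total_sz.isSome then PySem.List.pyGetD (PySem.List.pyGetD basis i []) 4 0 else 0

-- 'if total_tz is not None and 2*tsum - num_part != total_tz: return'
def pvB_tzFail (num_part : Int) (total_tz : Option Int) (tsum : Int) : Bool :=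
  match total_tz with
  | some t0 => 2 * tsum - num_part ≠ t0
  | none => false

def pvB_szFail (num_part : Int) (total_sz : Option Int) (ssum : Int) : Bool :=
  match total_sz with
  | some s0 => 2 * ssum - num_part ≠ s0
  | none => false

-- the recursive dfs; the Nat argument is need = num_part - len(chosen)
def pvB_dfs (basis : List (List Int)) (num_part : Int) (total_tz total_sz : Option Int) (n : Int) :
    Nat → Int → List Int → Int → Int → List (List Int × Int) → List (List Int × Int)
  | 0, _start, chosen, tsum, ssum, out =>
      if pvB_tzFail num_part total_tz tsum then out
      else if pvB_szFail num_part total_sz ssum then out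
      else out ++ [(chosen, (out.length : Int))]
  | (need+1), start, chosen, tsum, ssum, out =>
      (PySem.List.pyRange start (n - ((need : Int) + 1) + 1) 1).foldl
        (fun out i => pvB_dfs basis num_part total_tz total_sz n need (i + 1) (chosen ++ [i])
            (tsum + pvB_tv basis total_tz i) (ssum + pvB_sv basis total_sz i) out) out

def get_many_body_states_alt (basis : List (List Int)) (num_part : Int) (total_tz : Option Int) (total_sz : Option Int) : List (List Int × Int) :=
  if num_part < 0 then []   -- Python B raises ValueError here; outside Pre_
  else pvB_dfs basis num_part total_tz total_sz (basis.length : Int) num_part.toNat 0 [] 0 0 []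

-- ===== PRECONDITION & SPEC =====
-- Pre_ excludes inputs on which Python raises: num_part < 0 (ValueError from combinations in A, an
-- explicit ValueError in B), and reachable rows too short for the requested tz/sz columns
-- (IndexError); it also excludes short-row inputs where A's tz 'continue' happens to skip every
-- sz access so A returns {} while B (summing incrementally) still raises IndexError there.
def Pre_get_many_body_states (basis : List (List Int)) (num_part : Int) (total_tz : Option Int) (total_sz : Option Int) : Prop :=
  0 ≤ num_part ∧
  (num_part = 0 ∨ (basis.length : Int) < num_part ∨
    ((total_tz.isSome → ∀ r ∈ basis, 4 ≤ r.length) ∧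
     (total_sz.isSome → ∀ r ∈ basis, 5 ≤ r.length)))
instance (basis : List (List Int)) (num_part : Int) (total_tz : Option Int) (total_sz : Option Int) : Decidable (Pre_get_many_body_states basis num_part total_tz total_sz) := by unfold Pre_get_many_body_states; infer_instance

def pvWitness_get_many_body_states : List (List Int) × Int × Option Int × Option Int :=
  ([[0, 0, 0, 1, 0], [1, 0, 0, 0, 1]], 1, some 1, none)

def Spec_get_many_body_states (basis : List (List Int)) (num_part : Int) (total_tz : Option Int) (total_sz : Option Int) (out : List (List Int × Int)) : Prop := out = get_many_body_states_alt basis num_part total_tz total_sz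
instance (basis : List (List Int)) (num_part : Int) (total_tz : Option Int) (total_sz : Option Int) (out : List (List Int × Int)) : Decidable (Spec_get_many_body_states basis num_part total_tz total_sz out) := by unfold Spec_get_many_body_states; infer_instance

-- ===== CLAIM (what is proved, stated in full; the proofs are below) =====
def Claim_equal_get_many_body_states : Prop := ∀ (basis : List (List Int)) (num_part : Int) (total_tz : Option Int) (total_sz : Option Int), Dom_get_many_body_states basis num_part total_tz total_sz → Pre_get_many_body_states basis num_part total_tz total_sz → Spec_get_many_body_states basis num_part total_tz total_sz (get_many_body_states basis num_part total_tz total_sz)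

-- ===== LEMMAS AND PROOFS =====

-- attach indices m, m+1, … to a list of states (what B's 'out[tuple(chosen)] = len(out)' builds)
def pvIdxFrom (m : Int) : List (List Int) → List (List Int × Int)
  | [] => []
  | x :: xs => (x, m) :: pvIdxFrom (m + 1) xs

theorem pvIdxFrom_length (m : Int) (l : List (List Int)) : (pvIdxFrom m l).length = l.length := by
  induction l generalizing m with
  | nil => rfl
  | cons x xs ih => simp [pvIdxFrom, ih]

theorem pvIdxFrom_append (m : Int) (a b : List (List Int)) :
    pvIdxFrom m (a ++ b) = pvIdxFrom m a ++ pvIdxFrom (m + a.length) b := by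
  induction a generalizing m with
  | nil => simp [pvIdxFrom]
  | cons x xs ih => simp [pvIdxFrom, ih]; ring_nf

-- zip with range(dim) is pvIdxFrom
theorem pvZip_pyRange (l : List (List Int)) (m : Int) :
    List.zip l (PySem.List.pyRange m (m + l.length) 1) = pvIdxFrom m l := by
  induction l generalizing m with
  | nil => simp [pvIdxFrom, PySem.List.pyRange_one_eq_nil]
  | cons x xs ih =>
      rw [PySem.List.pyRange_one_cons (by simp only [List.length_cons]; push_cast; omega)]
      simp only [List.zip_cons_cons, pvIdxFrom]
      have h : m + ((x :: xs).length : Int) = (m + 1) + (xs.length : Int) := by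
        simp only [List.length_cons]; push_cast; ring
      rw [h, ih]

-- a foldl that appends indexed blocks is a flatMap
theorem pvFoldl_idx_flatMap (g : Int → List (List Int))
    (step : List (List Int × Int) → Int → List (List Int × Int))
    (hstep : ∀ out i, step out i = out ++ pvIdxFrom (out.length : Int) (g i)) :
    ∀ (l : List Int) (out : List (List Int × Int)),
      l.foldl step out = out ++ pvIdxFrom (out.length : Int) (l.flatMap g) := by
  intro l
  induction l with
  | nil => intro out; simp [pvIdxFrom]
  | cons i t ih =>
      intro out
      simp only [List.foldl_cons, List.flatMap_cons, hstep, ih]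
      rw [pvIdxFrom_append, List.append_assoc]
      congr 2
      simp [pvIdxFrom_length]

-- lexicographic combinations of [start, n) split by the first chosen index
theorem pvComb_split (n : Int) (r : Nat) :
    ∀ (m : Nat) (start : Int), (n - start).toNat ≤ m →
      PySem.List.combinations (PySem.List.pyRange start n 1) (r + 1) =
        (PySem.List.pyRange start (n - (r : Int)) 1).flatMap
          (fun i => (PySem.List.combinations (PySem.List.pyRange (i + 1) n 1) r).map (i :: ·)) := by
  intro m
  induction m with
  | zero =>
      intro start h
      rw [PySem.List.pyRange_one_eq_nil (a := start) (b := n) (by omega),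
          PySem.List.pyRange_one_eq_nil (a := start) (b := n - (r : Int)) (by omega)]
      simp [PySem.List.combinations_nil_succ]
  | succ m ih =>
      intro start h
      by_cases hlt : start < n - (r : Int)
      · rw [PySem.List.pyRange_one_cons (a := start) (b := n - (r : Int)) (by omega),
            PySem.List.pyRange_one_cons (a := start) (b := n) (by omega)]
        rw [PySem.List.combinations_cons_succ, List.flatMap_cons]
        rw [ih (start + 1) (by omega)]
      · rw [PySem.List.pyRange_one_eq_nil (a := start) (b := n - (r : Int)) (by omega)]
        have hlen : (PySem.List.pyRange start n 1).length < r + 1 := by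
          rw [PySem.List.length_pyRange_one]; omega
        rw [PySem.List.combinations_eq_nil_of_length_lt _ hlen]
        simp

-- B's leaf test
def pvPass (num_part : Int) (total_tz total_sz : Option Int) (t s : Int) : Bool :=
  !pvB_tzFail num_part total_tz t && !pvB_szFail num_part total_sz s

def pvSumTv (basis : List (List Int)) (total_tz : Option Int) (c : List Int) : Int :=
  (c.map (pvB_tv basis total_tz)).sum

def pvSumSv (basis : List (List Int)) (total_sz : Option Int) (c : List Int) : Int :=
  (c.map (pvB_sv basis total_sz)).sum

theorem pvFilter_map_flatMap (l : List Int) (f : Int → List (List Int)) (p : List Int → Bool)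
    (g : List Int → List Int) :
    ((l.flatMap f).filter p).map g = l.flatMap (fun i => (((f i).filter p).map g)) := by
  induction l with
  | nil => simp
  | cons i t ih => simp [List.filter_append, ih]

-- the DFS characterised: it appends the filtered suffix-combinations, indexed from out.length
theorem pvB_dfs_spec (basis : List (List Int)) (num_part : Int) (total_tz total_sz : Option Int) :
    ∀ (need : Nat) (start : Int) (chosen : List Int) (t s : Int) (out : List (List Int × Int)),
      pvB_dfs basis num_part total_tz total_sz (basis.length : Int) need start chosen t s out =
        out ++ pvIdxFrom (out.length : Int)
          (((PySem.List.combinations (PySem.List.pyRange start (basis.length : Int) 1) need).filter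
              (fun c => pvPass num_part total_tz total_sz
                (t + pvSumTv basis total_tz c) (s + pvSumSv basis total_sz c))).map
            (chosen ++ ·)) := by
  intro need
  induction need with
  | zero =>
      intro start chosen t s out
      rw [pvB_dfs, PySem.List.combinations_zero]
      simp only [List.filter, pvSumTv, pvSumSv, List.map_nil, List.sum_nil, add_zero, pvPass]
      by_cases h1 : pvB_tzFail num_part total_tz t
      · simp [h1, pvIdxFrom]
      · by_cases h2 : pvB_szFail num_part total_sz s
        · simp [h1, h2, pvIdxFrom]
        · simp [h1, h2, pvIdxFrom]
  | succ need ih =>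
      intro start chosen t s out
      rw [pvB_dfs]
      have hb : (basis.length : Int) - ((need : Int) + 1) + 1 = (basis.length : Int) - (need : Int) := by ring
      rw [hb]
      rw [pvFoldl_idx_flatMap
        (g := fun i => ((PySem.List.combinations (PySem.List.pyRange (i + 1) (basis.length : Int) 1) need).filter
              (fun c => pvPass num_part total_tz total_sz
                ((t + pvB_tv basis total_tz i) + pvSumTv basis total_tz c)
                ((s + pvB_sv basis total_sz i) + pvSumSv basis total_sz c))).map
            ((chosen ++ [i]) ++ ·))
        (hstep := fun out i => ih (i + 1) (chosen ++ [i]) (t + pvB_tv basis total_tz i) (s + pvB_sv basis total_sz i) out)]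
      congr 1
      congr 1
      rw [pvComb_split (basis.length : Int) need ((basis.length : Int) - start).toNat start le_rfl]
      rw [pvFilter_map_flatMap]
      apply List.flatMap_congr
      intro i hi
      rw [List.filter_map, List.map_map]
      have hp : ((fun c => pvPass num_part total_tz total_sz (t + pvSumTv basis total_tz c)
            (s + pvSumSv basis total_sz c)) ∘ (i :: ·)) =
          (fun c => pvPass num_part total_tz total_sz
            ((t + pvB_tv basis total_tz i) + pvSumTv basis total_tz c)
            ((s + pvB_sv basis total_sz i) + pvSumSv basis total_sz c)) := by
        funext c
        simp [pvSumTv, pvSumSv, Function.comp, add_assoc]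
      have hm : ((chosen ++ ·) ∘ (i :: ·)) = ((chosen ++ [i]) ++ ·) := by
        funext c; simp
      rw [hp, hm]

-- A's loop body is an if-filter step
theorem pvA_body_eq (basis : List (List Int)) (num_part : Int) (total_tz total_sz : Option Int)
    (acc : List (List Int)) (values : List Int) :
    pvA_body basis num_part total_tz total_sz acc values =
      if pvPass num_part total_tz total_sz
          (pvA_tzsum basis num_part values) (pvA_szsum basis num_part values)
      then acc ++ [values] else acc := by
  cases total_tz <;> cases total_sz <;>
    simp only [pvA_body, pvA_szCheck, pvPass, pvB_tzFail, pvB_szFail] <;>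
    split_ifs <;> simp_all

-- ===== VERDICT (by name: the statement is the Claim_ definition above) =====
theorem pvSum_eq (basis : List (List Int)) (num_part : Int) (hnp : 0 ≤ num_part)
    (c : List Int) (hc : c.length = num_part.toNat) (j : Int) :
    (PySem.List.pyRange 0 num_part 1).foldl
      (fun acc i => acc + PySem.List.pyGetD (PySem.List.pyGetD basis (PySem.List.pyGetD c i 0) []) j 0) 0 =
      (c.map (fun v => PySem.List.pyGetD (PySem.List.pyGetD basis v []) j 0)).sum := by
  have h1 : num_part = (c.length : Int) := by omega
  rw [h1]
  rw [PySem.List.foldl_pyRange_zero_pyGetD' c 0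
    (fun acc v => acc + PySem.List.pyGetD (PySem.List.pyGetD basis v []) j 0) 0]
  rw [PySem.List.foldl_add]
  simp

theorem pvB_tv_some (basis : List (List Int)) (t0 : Int) :
    pvB_tv basis (some t0) = fun i => PySem.List.pyGetD (PySem.List.pyGetD basis i []) 3 0 := by
  funext i; simp [pvB_tv]

theorem pvB_sv_some (basis : List (List Int)) (s0 : Int) :
    pvB_sv basis (some s0) = fun i => PySem.List.pyGetD (PySem.List.pyGetD basis i []) 4 0 := by
  funext i; simp [pvB_sv]

theorem get_many_body_states_spec : Claim_equal_get_many_body_states := by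
  intro basis num_part total_tz total_sz _hdom hpre
  obtain ⟨hnp, -⟩ := hpre
  unfold Spec_get_many_body_states get_many_body_states get_many_body_states_alt
  rw [if_neg (by omega)]
  rw [pvB_dfs_spec]
  simp only [List.nil_append, List.length_nil, Int.natCast_zero]
  -- A side: the loop is a filter
  have hbody : pvA_body basis num_part total_tz total_sz = fun acc v =>
      if pvPass num_part total_tz total_sz (pvA_tzsum basis num_part v) (pvA_szsum basis num_part v)
      then acc ++ [v] else acc := by
    funext acc v; exact pvA_body_eq basis num_part total_tz total_sz acc v
  rw [hbody, PySem.List.foldl_append_if_eq_filter]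
  set mb := (PySem.List.combinations (PySem.List.pyRange 0 (basis.length : Int) 1) num_part.toNat).filter
      (fun v => pvPass num_part total_tz total_sz (pvA_tzsum basis num_part v) (pvA_szsum basis num_part v)) with hmb
  simp only [List.nil_append]
  have hzip : List.zip mb (PySem.List.pyRange 0 (mb.length : Int) 1) = pvIdxFrom 0 mb := by
    have h0 : (mb.length : Int) = 0 + (mb.length : Int) := by ring
    rw [h0, pvZip_pyRange]
  rw [hzip]
  -- B side: map ([] ++ .) is the identity, 0 + x = x
  simp only [zero_add]
  rw [show (fun (x : List Int) => x) = (id : List Int → List Int) from rfl, List.map_id, hmb]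
  congr 1
  apply List.filter_congr
  intro c hcmem
  have hc : c.length = num_part.toNat := PySem.List.length_of_mem_combinations hcmem
  have htz := pvSum_eq basis num_part hnp c hc 3
  have hsz := pvSum_eq basis num_part hnp c hc 4
  cases total_tz <;> cases total_sz <;>
    simp [pvPass, pvB_tzFail, pvB_szFail, pvA_tzsum, pvA_szsum, pvSumTv, pvSumSv,
      pvB_tv_some, pvB_sv_some, htz, hsz]
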